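-- pv_equiv track=rewrite | github.com/Amatiri/Jx3kuu11yn1rxa2m-InputMethod | other/输入法控制台.py | ffkl
-- ===== SOURCE A (Python) =====
-- def ffkl(yr2):
--     # 初始分割
--     parts = yr2.split("'")
--     changed = True
--     while changed:
--         changed = False
--         new_parts = []
--         for part in parts:
--             # 检查这个part是否需要处理：tc1, tc2
--             tc1 = False
--             tc2 = False
--             wzvi = []
--
--             # 检查条件：pjdr函数
--             # 如果part不含数字且长度大于2，则tc1为True
--             if not any(char.isdigit() for char in part) and len(part) > 2:
--                 tc1 = True
--             # 遍历part的每个字符，检查数字位置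
--             for idx, char in enumerate(part):
--                 if char.isdigit():
--                     # 检查前一位不是数字且索引大于2
--                     if idx > 0 and not part[idx-1].isdigit() and idx > 2:
--                         tc2 = True
--                         wzvi.append(idx)
--
--             # 根据条件进行处理
--             if tc1:
--                 # 每两个字符分组并用单引号连接
--                 new_part = "'".join([part[i:i+2] for i in range(0, len(part), 2)])
--                 new_parts.extend(new_part.split("'"))
--                 changed = True
--             elif tc2:
--                 # 从后往前插入单引号，避免索引变化
--                 temp_part = part
--                 for pos in sorted(wzvi, reverse=True):
--                     temp_part = temp_part[:pos-2] + "'" + temp_part[pos-2:]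
--                 new_parts.extend(temp_part.split("'"))
--                 changed = True
--             else:
--                 new_parts.append(part)
--         parts = new_parts
--
--     # 过滤空字符串
--     parts = [p for p in parts if p != '']
--     return parts
-- ===== SOURCE B (Python) =====
-- # B: reduce each quote-separated part to its normal form by direct structural
-- # recursion (computing the cut points once and slicing directly), instead of
-- # rescanning and rebuilding the whole parts list round after round.
--
-- def _split_once(part):
--     """Return the list of pieces part splits into in one step, or None if terminal."""
--     digs = [i for i, c in enumerate(part) if c.isdigit()]
--     if not digs and len(part) > 2:
--         return [part[i:i + 2] for i in range(0, len(part), 2)]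
--     cuts = [i - 2 for i in digs if i > 2 and not part[i - 1].isdigit()]
--     if cuts:
--         bounds = [0] + cuts + [len(part)]
--         return [part[a:b] for a, b in zip(bounds, bounds[1:])]
--     return None
--
--
-- def _reduce(part, out):
--     pieces = _split_once(part)
--     if pieces is None:
--         if part:
--             out.append(part)
--     else:
--         for s in pieces:
--             _reduce(s, out)
--
--
-- def ffkl(yr2):
--     out = []
--     for p in yr2.split("'"):
--         _reduce(p, out)
--     return out
-- ===== Notes on version B (the rewrite author's own statement) =====
-- stated objective: alternative
-- what changed: B reduces each quote-separated part to its normal form once by direct recursion (computing the 2-char chunk boundaries / digit cut points and slicing directly), instead of A's repeated whole-list rescan passes that rebuild every part with join/split and per-position string insertions until a fixpoint.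
import Mathlib
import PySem

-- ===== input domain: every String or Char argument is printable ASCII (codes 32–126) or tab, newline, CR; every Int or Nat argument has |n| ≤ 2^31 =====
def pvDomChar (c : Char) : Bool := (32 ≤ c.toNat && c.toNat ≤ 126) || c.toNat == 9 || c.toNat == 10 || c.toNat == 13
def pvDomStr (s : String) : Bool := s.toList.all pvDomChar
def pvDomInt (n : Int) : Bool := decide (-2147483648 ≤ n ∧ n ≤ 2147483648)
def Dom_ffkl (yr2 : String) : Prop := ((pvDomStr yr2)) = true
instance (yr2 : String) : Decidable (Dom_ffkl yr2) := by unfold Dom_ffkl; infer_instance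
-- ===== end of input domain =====

-- B re-implements A by reducing each quote-separated part to its normal form once,
-- by direct recursion with directly computed chunk/cut boundaries, instead of A's
-- repeated whole-list rescan passes with join/split string surgery.

-- ===== PORT A =====

-- the inner `for idx, char in enumerate(part)` loop computing (tc2, wzvi)
def aScan (part : List Char) : Bool × List Int :=
  (PySem.List.enumerate part).foldl (fun st ic =>
    if PySem.Chars.isdigit ic.2 then
      if decide (ic.1 > 0) && !((PySem.List.pyGet? part (ic.1 - 1)).elim false PySem.Chars.isdigit)
           && decide (ic.1 > 2)
      then (true, st.2 ++ [ic.1]) else st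
    else st) (false, [])

-- the body of `for part in parts`, threading (changed, new_parts)
def aProcess (st : Bool × List (List Char)) (part : List Char) : Bool × List (List Char) :=
  let tc1 : Bool := !(part.any PySem.Chars.isdigit) && decide (2 < part.length)
  let s2 := aScan part
  if tc1 then
    let new_part := PySem.Chars.join ['\'']
      ((PySem.List.pyRange 0 part.length 2).map
        (fun i => PySem.List.slice part (some i) (some (i + 2))))
    (true, st.2 ++ PySem.Chars.splitOn new_part ['\''])
  else if s2.1 then
    let temp := (PySem.List.sorted s2.2 (fun x => x) true).foldl
      (fun t pos => PySem.List.slice t none (some (pos - 2)) ++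
                    '\'' :: PySem.List.slice t (some (pos - 2)) none) part
    (true, st.2 ++ PySem.Chars.splitOn temp ['\''])
  else (st.1, st.2 ++ [part])

-- one iteration of the `while changed` body
def aPass (parts : List (List Char)) : Bool × List (List Char) :=
  parts.foldl aProcess (false, [])

-- the `while changed` loop; fuel only makes the recursion total, lemma `aLoop_eq`
-- below proves the fuel passed by `ffkl` is never exhausted
def aLoop (fuel : Nat) (parts : List (List Char)) : List (List Char) :=
  match fuel with
  | 0 => parts
  | fuel + 1 =>
    let r := aPass parts
    if r.1 then aLoop fuel r.2 else r.2

def ffkl (yr2 : String) : List String :=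
  let parts := PySem.Chars.splitOn yr2.toList ['\'']
  let res := aLoop ((parts.map (fun p => 3 ^ p.length)).sum + 1) parts
  (res.filter (fun p => p ≠ [])).map (fun l => String.ofList l)

-- ===== PORT B =====

-- digs = [i for i, c in enumerate(part) if c.isdigit()]
def bDigs (part : List Char) : List Int :=
  ((PySem.List.enumerate part).filter (fun ic => PySem.Chars.isdigit ic.2)).map (fun ic => ic.1)

-- [part[i:i+2] for i in range(0, len(part), 2)]
def bChunks (part : List Char) : List (List Char) :=
  (PySem.List.pyRange 0 part.length 2).map
    (fun i => PySem.List.slice part (some i) (some (i + 2)))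

-- cuts = [i - 2 for i in digs if i > 2 and not part[i-1].isdigit()]
def bCuts (part : List Char) (digs : List Int) : List Int :=
  (digs.filter (fun i =>
    decide (i > 2) && !((PySem.List.pyGet? part (i - 1)).elim false PySem.Chars.isdigit))).map
    (fun i => i - 2)

-- _split_once
def bBounds (cuts : List Int) (n : Nat) : List Int := (0 : Int) :: cuts ++ [(n : Int)]

def bSplitOnce (part : List Char) : Option (List (List Char)) :=
  if bDigs part = [] ∧ 2 < part.length then some (bChunks part)
  else if bCuts part (bDigs part) = [] then none
  else
    some (((bBounds (bCuts part (bDigs part)) part.length).zip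
           (bBounds (bCuts part (bDigs part)) part.length).tail).map
      (fun ab => PySem.List.slice part (some ab.1) (some ab.2)))

-- _reduce; the Nat fuel only makes the recursion total: every piece produced by
-- _split_once is strictly shorter than part (lemma bSplitOnce_shorter below), so
-- fuel = part.length + 1 at the call site is never exhausted
def bReduce (fuel : Nat) (part : List Char) : List (List Char) :=
  match fuel with
  | 0 => []
  | fuel + 1 =>
    match bSplitOnce part with
    | none => if part = [] then [] else [part]
    | some ps => ps.flatMap (fun s => bReduce fuel s)

def ffkl_alt (yr2 : String) : List String :=
  ((PySem.Chars.splitOn yr2.toList ['\'']).flatMap (fun p => bReduce (p.length + 1) p)).map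
    (fun l => String.ofList l)

-- ===== PRECONDITION & SPEC =====
def Spec_ffkl (yr2 : String) (out : List String) : Prop := out = ffkl_alt yr2
instance (yr2 : String) (out : List String) : Decidable (Spec_ffkl yr2 out) := by unfold Spec_ffkl; infer_instance

-- ===== CLAIM (what is proved, stated in full; the proofs are below) =====
def Claim_equal_ffkl : Prop := ∀ (yr2 : String), Dom_ffkl yr2 → Spec_ffkl yr2 (ffkl yr2)

-- ===== LEMMAS AND PROOFS =====

-- ---------- index bounds and the piece-shrinking fact ----------
theorem clampIdx_of_nonneg (n : Nat) (i : Int) (h : 0 ≤ i) :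
    PySem.List.clampIdx n i = min i.toNat n := by
  unfold PySem.List.clampIdx
  split_ifs <;> omega

theorem mem_bDigs (part : List Char) (i : Int) (h : i ∈ bDigs part) :
    0 ≤ i ∧ i < (part.length : Int) := by
  simp only [bDigs, List.mem_map, List.mem_filter] at h
  obtain ⟨ic, ⟨hm, _⟩, rfl⟩ := h
  rw [PySem.List.mem_enumerate_iff] at hm
  obtain ⟨k, hk, rfl⟩ := hm
  simp
  omega

theorem mem_bCuts (part : List Char) (c : Int) (h : c ∈ bCuts part (bDigs part)) :
    1 ≤ c ∧ c + 3 ≤ (part.length : Int) := by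
  simp only [bCuts, List.mem_map, List.mem_filter] at h
  obtain ⟨i, ⟨hi, hcond⟩, rfl⟩ := h
  have := mem_bDigs part i hi
  simp only [Bool.and_eq_true, decide_eq_true_eq] at hcond
  omega

-- every piece produced by _split_once is strictly shorter (so the fuel suffices)
theorem bSplitOnce_shorter (part : List Char) (ps : List (List Char))
    (h : bSplitOnce part = some ps) : ∀ s ∈ ps, s.length < part.length := by
  unfold bSplitOnce at h
  split_ifs at h with h1 h2
  · -- chunk branch: every chunk has length ≤ 2 < part.length
    obtain ⟨-, hlen⟩ := h1
    obtain rfl := Option.some.inj h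
    intro s hs
    simp only [bChunks, List.mem_map] at hs
    obtain ⟨i, hi, rfl⟩ := hs
    have hpos : (0:Int) < 2 := by norm_num
    rw [PySem.List.mem_pyRange_iff_of_pos hpos] at hi
    rw [PySem.List.length_slice, clampIdx_of_nonneg _ _ hi.1,
        clampIdx_of_nonneg _ _ (by omega : (0:Int) ≤ i + 2)]
    omega
  · obtain rfl := Option.some.inj h
    intro s hs
    simp only [List.mem_map] at hs
    obtain ⟨ab, hab, rfl⟩ := hs
    -- part.length ≥ 4 since cuts nonempty
    obtain ⟨c0, cs, hcuts⟩ := List.exists_cons_of_ne_nil h2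
    have hc0 : c0 ∈ bCuts part (bDigs part) := by rw [hcuts]; exact List.mem_cons_self ..
    have hL4 : 4 ≤ part.length := by have := mem_bCuts part c0 hc0; omega
    rw [hcuts] at hab
    unfold bBounds at hab
    simp only [List.cons_append, List.zip_cons_cons, List.tail_cons, List.mem_cons] at hab
    rw [PySem.List.length_slice]
    rcases hab with rfl | hab
    · -- first pair (0, c0)
      rw [clampIdx_of_nonneg _ _ (by norm_num : (0:Int) ≤ 0),
          clampIdx_of_nonneg _ _ (by have := mem_bCuts part c0 hc0; omega)]
      have := mem_bCuts part c0 hc0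
      omega
    · -- later pair: first component is a cut (≥ 1) or part.length
      have h1m := (List.of_mem_zip hab).1
      have hble : PySem.List.clampIdx part.length ab.2 ≤ part.length := by
        unfold PySem.List.clampIdx; split_ifs <;> omega
      have hcase : ab.1 ∈ bCuts part (bDigs part) ∨ ab.1 = (part.length : Int) := by
        rcases List.mem_cons.1 h1m with heq | h1m'
        · exact Or.inl (heq ▸ hc0)
        · rcases List.mem_append.1 h1m' with hm | hm
          · exact Or.inl (by rw [hcuts]; exact List.mem_cons_of_mem _ hm)
          · exact Or.inr (by simpa using hm)
      rcases hcase with hc | heq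
      · have := mem_bCuts part ab.1 hc
        rw [show PySem.List.clampIdx part.length ab.1 = min ab.1.toNat part.length from
             clampIdx_of_nonneg _ _ (by omega)]
        omega
      · have h2' : PySem.List.clampIdx part.length ((part.length : Nat) : Int) = part.length := by
          rw [clampIdx_of_nonneg _ _ (by omega)]; omega
        rw [heq, h2']
        omega

-- ---------- the reduction WITHOUT the empty filter (A filters only at the end) ----------
def redNF (fuel : Nat) (part : List Char) : List (List Char) :=
  match fuel with
  | 0 => []
  | fuel + 1 =>
    match bSplitOnce part with
    | none => [part]
    | some ps => ps.flatMap (fun s => redNF fuel s)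

def redF (p : List Char) : List (List Char) := redNF (p.length + 1) p

-- the loop measure
def W (parts : List (List Char)) : Nat := (parts.map (fun p => 3 ^ p.length)).sum

-- one reduction step as a total function
def step1 (part : List Char) : List (List Char) := (bSplitOnce part).getD [part]


-- ---------- Group 1: PySem.Chars.splitOn on a one-character separator ----------
theorem splitOn_go_eq (c : Char) (fuel : Nat) (s cur : List Char) (acc : List (List Char)) (hs : s.length ≤ fuel) :
    PySem.Chars.splitOn.go [c] fuel s cur acc =
      acc.reverse ++ List.modifyHead (fun p => cur.reverse ++ p) (List.splitOn c s) := by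
  induction fuel generalizing s cur acc with
  | zero =>
    have h0 : s = [] := List.eq_nil_of_length_eq_zero (Nat.le_zero.mp hs)
    subst h0
    simp [PySem.Chars.splitOn.go, List.splitOn, List.splitOnP_nil]
  | succ fuel ih =>
    cases s with
    | nil => simp [PySem.Chars.splitOn.go, List.splitOn, List.splitOnP_nil]
    | cons x rest =>
      have hstep : PySem.Chars.splitOn.go [c] (fuel+1) (x::rest) cur acc =
          if [c].isPrefixOf (x::rest) then
            PySem.Chars.splitOn.go [c] fuel (List.drop [c].length (x::rest)) [] (cur.reverse :: acc)
          else PySem.Chars.splitOn.go [c] fuel rest (x :: cur) acc := rfl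
      rw [hstep]
      simp only [List.isPrefixOf, Bool.and_true, List.length_cons,
        List.length_nil, List.drop_succ_cons, List.drop_zero]
      by_cases hxc : x = c
      · subst hxc
        rw [if_pos (by simp)]
        rw [ih rest [] (cur.reverse :: acc) (by simpa using hs)]
        have : List.splitOn x (x :: rest) = [] :: List.splitOn x rest := by
          simp [List.splitOn, List.splitOnP_cons]
        rw [this]
        rcases hsp : List.splitOn x rest with _ | ⟨h1, t1⟩
        · exact absurd hsp (by simp [List.splitOn, List.splitOnP_ne_nil])
        · simp
      · rw [if_neg (by simp [beq_iff_eq]; exact fun h => hxc h.symm)]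
        rw [ih rest (x :: cur) acc (by simpa using hs)]
        have : List.splitOn c (x :: rest) = List.modifyHead (fun p => x :: p) (List.splitOn c rest) := by
          simp [List.splitOn, List.splitOnP_cons, hxc]
        rw [this]
        rcases hsp : List.splitOn c rest with _ | ⟨h1, t1⟩
        · exact absurd hsp (by simp [List.splitOn, List.splitOnP_ne_nil])
        · simp

theorem chars_splitOn_eq (s : List Char) (c : Char) :
    PySem.Chars.splitOn s [c] = List.splitOn c s := by
  rw [PySem.Chars.splitOn, splitOn_go_eq c (s.length+1) s [] [] (by omega)]
  rcases hsp : List.splitOn c s with _ | ⟨h1, t1⟩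
  · exact absurd hsp (by simp [List.splitOn, List.splitOnP_ne_nil])
  · simp

theorem splitOn_sep_free (c : Char) (s : List Char) : ∀ p ∈ List.splitOn c s, c ∉ p := by
  induction s with
  | nil => intro p hp; simp [List.splitOn, List.splitOnP_nil] at hp; subst hp; simp
  | cons x rest ih =>
    intro p hp
    by_cases hxc : x = c
    · subst hxc
      rw [show List.splitOn x (x :: rest) = [] :: List.splitOn x rest by
        simp [List.splitOn, List.splitOnP_cons]] at hp
      rcases List.mem_cons.1 hp with rfl | hp'
      · simp
      · exact ih p hp'
    · rw [show List.splitOn c (x :: rest) = List.modifyHead (fun q => x :: q) (List.splitOn c rest) by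
        simp [List.splitOn, List.splitOnP_cons, hxc]] at hp
      rcases hsp : List.splitOn c rest with _ | ⟨h1, t1⟩
      · exact absurd hsp (by simp [List.splitOn, List.splitOnP_ne_nil])
      · rw [hsp] at hp
        simp only [List.modifyHead] at hp
        rcases List.mem_cons.1 hp with rfl | hp'
        · intro hmem
          rcases List.mem_cons.1 hmem with rfl | hm
          · exact hxc rfl
          · exact ih h1 (by rw [hsp]; exact List.mem_cons_self ..) hm
        · exact ih p (by rw [hsp]; exact List.mem_cons_of_mem _ hp')

-- ---------- Group 2: the inner scan loop computes exactly B's cut list ----------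
def wCuts (part : List Char) : List Int := bCuts part (bDigs part)

def scanP (part : List Char) (ic : Int × Char) : Bool :=
  PySem.Chars.isdigit ic.2 && (decide (ic.1 > 0) &&
    !((PySem.List.pyGet? part (ic.1 - 1)).elim false PySem.Chars.isdigit) &&
    decide (ic.1 > 2))

theorem bCuts_eq (part : List Char) :
    wCuts part = (((PySem.List.enumerate part).filter (scanP part)).map
      (fun ic => ic.1)).map (fun i => i - 2) := by
  unfold wCuts bCuts bDigs
  rw [List.filter_map, List.filter_filter]
  congr 2
  apply List.filter_congr
  intro ic _
  rcases ic with ⟨i, ch⟩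
  simp only [Function.comp, scanP]
  by_cases h2 : (2:Int) < i
  · have h0 : (0:Int) < i := by omega
    simp [h0, h2, Bool.and_comm]
  · simp [h2]

theorem foldacc (P : Int × Char → Bool) (l : List (Int × Char)) (b0 : Bool) (acc : List Int) :
    l.foldl (fun st ic => if P ic then (true, st.2 ++ [ic.1]) else st) (b0, acc)
      = (b0 || !(l.filter P).isEmpty, acc ++ (l.filter P).map (fun ic => ic.1)) := by
  induction l generalizing b0 acc with
  | nil => simp
  | cons ic t ih =>
    by_cases h : P ic
    · simp only [List.foldl_cons, if_pos h, ih, List.filter_cons_of_pos h]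
      simp
    · simp only [List.foldl_cons, if_neg h, ih, List.filter_cons_of_neg h]

theorem aScan_eq (part : List Char) :
    aScan part = (!((wCuts part).map (fun i => i + 2)).isEmpty,
                  (wCuts part).map (fun i => i + 2)) := by
  have hfun : (fun (st : Bool × List Int) (ic : Int × Char) =>
      if PySem.Chars.isdigit ic.2 then
        if decide (ic.1 > 0) && !((PySem.List.pyGet? part (ic.1 - 1)).elim false PySem.Chars.isdigit)
             && decide (ic.1 > 2)
        then (true, st.2 ++ [ic.1]) else st
      else st)
      = (fun st ic => if scanP part ic then (true, st.2 ++ [ic.1]) else st) := by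
    funext st ic
    by_cases hd : PySem.Chars.isdigit ic.2
    · by_cases hc : (decide (ic.1 > 0) && !((PySem.List.pyGet? part (ic.1 - 1)).elim false PySem.Chars.isdigit)
             && decide (ic.1 > 2)) = true
      · simp [scanP, hd, hc]
      · simp only [hd, if_true, if_neg hc]
        rw [if_neg (by simp [scanP, hd]; simp at hc; intro ha hb; exact hc ha hb)]
    · simp [scanP, hd]
  have hmm : (wCuts part).map (fun i => i + 2)
      = ((PySem.List.enumerate part).filter (scanP part)).map (fun ic => ic.1) := by
    rw [bCuts_eq, List.map_map, List.map_map]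
    simp
  rw [aScan, hfun, foldacc]
  simp [hmm]

theorem wCuts_pairwise (part : List Char) : (wCuts part).Pairwise (· < ·) := by
  rw [bCuts_eq]
  apply List.Pairwise.map
  · intro a b hab
    exact hab
  · apply List.Pairwise.map
    · intro a b (hab : a.1 < b.1); omega
    · exact ((PySem.List.pairwise_lt_enumerate part 0).sublist List.filter_sublist)

-- ---------- Group 3: the chunk branch ----------
theorem bDigs_eq_nil_iff (part : List Char) :
    bDigs part = [] ↔ part.any PySem.Chars.isdigit = false := by
  unfold bDigs
  rw [List.map_eq_nil_iff, List.filter_eq_nil_iff, List.any_eq_false]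
  constructor
  · intro h x hx
    obtain ⟨k, hk, rfl⟩ := List.mem_iff_getElem.1 hx
    exact h ((0:Int) + k, part[k]) (by rw [PySem.List.mem_enumerate_iff]; exact ⟨k, hk, rfl⟩)
  · intro h ic hic
    rw [PySem.List.mem_enumerate_iff] at hic
    obtain ⟨k, hk, rfl⟩ := hic
    exact h part[k] (List.getElem_mem hk)

theorem bChunks_eq (part : List Char) :
    bChunks part = (List.range (((part.length : Int) + 1) / 2).toNat).map
      (fun j => (part.drop (2 * j)).take 2) := by
  unfold bChunks
  rw [PySem.List.pyRange_of_pos _ _ (by norm_num : (0:Int) < 2)]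
  have hcount : (if (0:Int) < (part.length : Int) then
      (((part.length : Int) - 0 + 2 - 1) / 2).toNat else 0) = (((part.length : Int) + 1) / 2).toNat := by
    split_ifs with h <;> omega
  rw [hcount, List.map_map]
  apply List.map_congr_left
  intro j hj
  simp only [Function.comp]
  rw [PySem.List.slice_toNat part (a := 0 + 2 * (j:Int)) (b := 0 + 2 * (j:Int) + 2) (by omega) (by omega)]
  rw [show ((0:Int) + 2 * (j:Int)).toNat = 2 * j by omega,
      show ((0:Int) + 2 * (j:Int) + 2).toNat = 2 * j + 2 by omega]
  congr 1
  omega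

theorem bChunks_flatten (part : List Char) : (bChunks part).flatten = part := by
  rw [bChunks_eq]
  have aux : ∀ k : Nat, ((List.range k).map (fun j => (part.drop (2 * j)).take 2)).flatten
      = part.take (2 * k) := by
    intro k
    induction k with
    | zero => simp
    | succ k ih =>
      rw [List.range_succ, List.map_append, List.flatten_append, ih]
      simp only [List.map_cons, List.map_nil, List.flatten_cons, List.flatten_nil, List.append_nil]
      rw [show 2 * (k + 1) = 2 * k + 2 by omega, List.take_add]
  rw [aux, List.take_of_length_le (by omega)]

theorem bChunks_props (part : List Char) (h3 : 2 < part.length) :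
    (∀ s ∈ bChunks part, s ≠ []) ∧ 2 ≤ (bChunks part).length := by
  constructor
  · intro s hs
    rw [bChunks_eq] at hs
    obtain ⟨j, hj, rfl⟩ := List.mem_map.1 hs
    rw [List.mem_range] at hj
    apply List.ne_nil_of_length_pos
    rw [List.length_take, List.length_drop]
    omega
  · rw [bChunks_eq, List.length_map, List.length_range]
    omega

theorem bChunks_subset (part : List Char) : ∀ s ∈ bChunks part, ∀ x ∈ s, x ∈ part := by
  intro s hs x hx
  unfold bChunks at hs
  obtain ⟨i, _, rfl⟩ := List.mem_map.1 hs
  exact PySem.List.mem_of_mem_slice _ _ _ hx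

-- ---------- Group 4: the cut branch ----------
def segsOf (p : List Char) (cs : List Int) : List (List Char) :=
  ((bBounds cs p.length).zip (bBounds cs p.length).tail).map
    (fun ab => PySem.List.slice p (some ab.1) (some ab.2))

def insQ (t : List Char) (c : Int) : List Char :=
  PySem.List.slice t none (some c) ++ '\'' :: PySem.List.slice t (some c) none

theorem join_eq_intercalate : PySem.Chars.join ['\''] = List.intercalate ['\''] := rfl

theorem join_snoc (xs : List (List Char)) (y : List Char) (hne : xs ≠ []) :
    PySem.Chars.join ['\''] (xs ++ [y]) = PySem.Chars.join ['\''] xs ++ '\'' :: y := by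
  induction xs with
  | nil => exact absurd rfl hne
  | cons x t ih =>
    cases t with
    | nil => simp [PySem.Chars.join_cons_cons, PySem.Chars.join_singleton]
    | cons x2 t2 =>
      rw [List.cons_append, PySem.Chars.join_cons_cons, List.cons_append,
          PySem.Chars.join_cons_cons, ← List.cons_append, ih (by simp)]
      simp

theorem pairs_snoc (l : List Int) (y : Int) (h : l ≠ []) :
    (l ++ [y]).zip (l ++ [y]).tail = l.zip l.tail ++ [(l.getLast h, y)] := by
  induction l with
  | nil => exact absurd rfl h
  | cons x t ih =>
    cases t with
    | nil => simp
    | cons x2 t2 =>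
      have hih := ih (by simp)
      simp only [List.cons_append, List.tail_cons, List.zip_cons_cons] at hih ⊢
      rw [hih]
      simp [List.getLast_cons]

theorem segsOf_nil (p : List Char) : segsOf p [] = [p] := by
  unfold segsOf bBounds
  simp

theorem segsOf_length (p : List Char) (cs : List Int) :
    (segsOf p cs).length = cs.length + 1 := by
  unfold segsOf bBounds
  simp [List.length_zip]

theorem slice_take (p : List Char) (a b c : Int) (h0 : 0 ≤ a) (hb : 0 ≤ b) (hbc : b ≤ c)
    (hc : 0 ≤ c) :
    PySem.List.slice (p.take c.toNat) (some a) (some b) = PySem.List.slice p (some a) (some b) := by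
  rw [PySem.List.slice_toNat _ h0 hb, PySem.List.slice_toNat _ h0 hb]
  rw [List.drop_take, List.take_take]
  congr 1
  omega

theorem segsOf_snoc (p : List Char) (cs : List Int) (c : Int)
    (hcs : ∀ e ∈ cs, 0 ≤ e ∧ e < c) (hc0 : 0 ≤ c) (hcL : c ≤ (p.length : Int)) :
    segsOf p (cs ++ [c]) = segsOf (p.take c.toNat) cs ++ [p.drop c.toNat] := by
  unfold segsOf bBounds
  have hlen : ((p.take c.toNat).length : Int) = c := by
    rw [List.length_take]
    omega
  have hp2 := pairs_snoc ((0 : Int) :: (cs ++ [c])) (p.length : Int) (by simp)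
  have hlast : ((0 : Int) :: (cs ++ [c])).getLast (by simp) = c := by
    show (((0 : Int) :: cs) ++ [c]).getLast (by simp) = c
    exact List.getLast_concat
  rw [hlast] at hp2
  simp only [List.cons_append] at hp2 ⊢
  rw [hp2, List.map_append, hlen]
  congr 1
  · apply List.map_congr_left
    intro ab hab
    have h1 := (List.of_mem_zip hab).1
    have h2 := (List.of_mem_zip hab).2
    simp only [List.tail_cons] at h2
    have ha : 0 ≤ ab.1 := by
      rcases List.mem_cons.1 h1 with heq | hm
      · omega
      · rcases List.mem_append.1 hm with hm | hm
        · exact (hcs _ hm).1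
        · simp at hm; omega
    have hble : 0 ≤ ab.2 ∧ ab.2 ≤ c := by
      rcases List.mem_append.1 h2 with hm | hm
      · have := hcs _ hm; omega
      · simp at hm; omega
    rw [slice_take p ab.1 ab.2 c ha hble.1 hble.2 hc0]
  · simp only [List.map_cons, List.map_nil, List.cons.injEq, and_true]
    rw [PySem.List.slice_toNat _ hc0 (by omega)]
    rw [List.take_of_length_le (by rw [List.length_drop]; omega)]

theorem insQ_length (u : List Char) (e : Int) : (insQ u e).length = u.length + 1 := by
  have hcl : PySem.List.clampIdx u.length e ≤ u.length := by
    unfold PySem.List.clampIdx; split_ifs <;> omega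
  unfold insQ PySem.List.slice
  simp only [List.length_append, List.length_cons, List.length_take, List.length_drop,
    List.drop_zero]
  omega

theorem insQ_append (cs : List Int) (u v : List Char)
    (h : ∀ e ∈ cs, 0 ≤ e ∧ e ≤ (u.length : Int)) :
    List.foldl insQ (u ++ v) cs = List.foldl insQ u cs ++ v := by
  induction cs generalizing u with
  | nil => simp
  | cons e t ih =>
    have he := h e (List.mem_cons_self ..)
    have hstep : insQ (u ++ v) e = insQ u e ++ v := by
      unfold insQ
      rw [PySem.List.slice_to _ he.1, PySem.List.slice_to _ he.1,
          PySem.List.slice_from _ he.1, PySem.List.slice_from _ he.1]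
      rw [List.take_append_of_le_length (by omega), List.drop_append_of_le_length (by omega)]
      simp
    rw [List.foldl_cons, List.foldl_cons, hstep, ih (insQ u e) ?_]
    intro e' he'
    have := h e' (List.mem_cons_of_mem _ he')
    rw [insQ_length]
    omega

theorem insQ_fold (cs : List Int) (p : List Char)
    (hpw : cs.Pairwise (· < ·)) (hb : ∀ e ∈ cs, 1 ≤ e ∧ e < (p.length : Int)) :
    List.foldl insQ p cs.reverse = ['\''].intercalate (segsOf p cs) := by
  rw [← join_eq_intercalate]
  induction cs using List.reverseRecOn generalizing p with
  | nil => rw [segsOf_nil]; simp [PySem.Chars.join_singleton]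
  | append_singleton cs c ih =>
    have hc := hb c (by simp)
    have hcsb : ∀ e ∈ cs, 1 ≤ e ∧ e < c := by
      intro e he
      have := (List.pairwise_append.1 hpw).2.2 e he c (by simp)
      have := hb e (by simp [he])
      omega
    have hlen : ((p.take c.toNat).length : Int) = c := by rw [List.length_take]; omega
    rw [List.reverse_append, List.reverse_singleton, List.singleton_append, List.foldl_cons]
    have hins : insQ p c = p.take c.toNat ++ '\'' :: p.drop c.toNat := by
      unfold insQ
      rw [PySem.List.slice_to _ (by omega), PySem.List.slice_from _ (by omega)]
    rw [hins, insQ_append _ _ _ ?bounds]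
    case bounds =>
      intro e he
      rw [List.mem_reverse] at he
      have := hcsb e he
      omega
    rw [ih (p.take c.toNat) (List.pairwise_append.1 hpw).1
        (by intro e he; rw [hlen]; exact hcsb e he)]
    rw [← join_snoc _ _ ?ne]
    case ne =>
      have := segsOf_length (p.take c.toNat) cs
      intro hnil
      rw [hnil] at this
      simp at this
    rw [← segsOf_snoc p cs c (by intro e he; have := hcsb e he; omega) (by omega) (by omega)]

theorem segsOf_props (p : List Char) (cs : List Int)
    (hpw : cs.Pairwise (· < ·)) (hb : ∀ e ∈ cs, 1 ≤ e ∧ e < (p.length : Int))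
    (hp : p ≠ []) :
    (segsOf p cs).flatten = p ∧ ∀ s ∈ segsOf p cs, s ≠ [] := by
  induction cs using List.reverseRecOn generalizing p with
  | nil => rw [segsOf_nil]; exact ⟨by simp, by simpa using hp⟩
  | append_singleton cs c ih =>
    have hc := hb c (by simp)
    have hcsb : ∀ e ∈ cs, 1 ≤ e ∧ e < c := by
      intro e he
      have := (List.pairwise_append.1 hpw).2.2 e he c (by simp)
      have := hb e (by simp [he])
      omega
    have hlen : ((p.take c.toNat).length : Int) = c := by rw [List.length_take]; omega
    have htne : p.take c.toNat ≠ [] := by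
      apply List.ne_nil_of_length_pos
      rw [List.length_take]
      omega
    have hdne : p.drop c.toNat ≠ [] := by
      apply List.ne_nil_of_length_pos
      rw [List.length_drop]
      omega
    rw [segsOf_snoc p cs c (by intro e he; have := hcsb e he; omega) (by omega) (by omega)]
    obtain ⟨ihf, ihne⟩ := ih (p.take c.toNat) (List.pairwise_append.1 hpw).1
        (by intro e he; rw [hlen]; exact hcsb e he) htne
    constructor
    · rw [List.flatten_append, ihf]
      simp
    · intro s hs
      rcases List.mem_append.1 hs with hm | hm
      · exact ihne s hm
      · simp only [List.mem_singleton] at hm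
        subst hm
        exact hdne

theorem segsOf_subset (p : List Char) (cs : List Int) :
    ∀ s ∈ segsOf p cs, ∀ x ∈ s, x ∈ p := by
  intro s hs x hx
  unfold segsOf at hs
  obtain ⟨ab, _, rfl⟩ := List.mem_map.1 hs
  exact PySem.List.mem_of_mem_slice _ _ _ hx

-- ---------- Group 5: pieces of one step ----------
theorem segsOf_shape (part : List Char) :
    (((bBounds (bCuts part (bDigs part)) part.length).zip
        (bBounds (bCuts part (bDigs part)) part.length).tail).map
      (fun ab => PySem.List.slice part (some ab.1) (some ab.2)))
      = segsOf part (wCuts part) := rfl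

theorem wCuts_bounds (part : List Char) :
    ∀ e ∈ wCuts part, 1 ≤ e ∧ e < (part.length : Int) := by
  intro e he
  have := mem_bCuts part e he
  omega

theorem bSplitOnce_subset (part : List Char) (ps : List (List Char))
    (h : bSplitOnce part = some ps) : ∀ s ∈ ps, ∀ x ∈ s, x ∈ part := by
  unfold bSplitOnce at h
  split_ifs at h with h1 h2
  · obtain rfl := Option.some.inj h
    exact bChunks_subset part
  · obtain rfl := Option.some.inj h
    rw [segsOf_shape]
    exact segsOf_subset part _

theorem bSplitOnce_pieces (part : List Char) (ps : List (List Char))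
    (h : bSplitOnce part = some ps) :
    ps.flatten = part ∧ (∀ s ∈ ps, s ≠ []) ∧ 2 ≤ ps.length := by
  unfold bSplitOnce at h
  split_ifs at h with h1 h2
  · obtain rfl := Option.some.inj h
    obtain ⟨hne, hcnt⟩ := bChunks_props part h1.2
    exact ⟨bChunks_flatten part, hne, hcnt⟩
  · obtain rfl := Option.some.inj h
    rw [segsOf_shape]
    have hcne : wCuts part ≠ [] := h2
    obtain ⟨c0, cs0, hc0⟩ := List.exists_cons_of_ne_nil hcne
    have hL : 4 ≤ part.length := by
      have := mem_bCuts part c0 (by rw [show bCuts part (bDigs part) = wCuts part from rfl, hc0]; exact List.mem_cons_self ..)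
      omega
    obtain ⟨hf, hne⟩ := segsOf_props part (wCuts part) (wCuts_pairwise part)
      (wCuts_bounds part) (by apply List.ne_nil_of_length_pos; omega)
    refine ⟨hf, hne, ?_⟩
    rw [segsOf_length, hc0]
    simp

theorem len_le_sum (ls : List Nat) (h1 : ∀ l ∈ ls, 1 ≤ l) : ls.length ≤ ls.sum := by
  induction ls with
  | nil => simp
  | cons a t ih =>
    have := h1 a (List.mem_cons_self ..)
    have := ih (fun l hl => h1 l (List.mem_cons_of_mem _ hl))
    simp only [List.length_cons, List.sum_cons]
    omega

theorem exp_sum_le (ls : List Nat) (h1 : ∀ l ∈ ls, 1 ≤ l) :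
    (ls.map (fun l => 3 ^ l)).sum ≤ ls.length * 3 ^ (ls.sum - (ls.length - 1)) := by
  induction ls with
  | nil => simp
  | cons a t ih =>
    have ha := h1 a (List.mem_cons_self ..)
    have iht := ih (fun l hl => h1 l (List.mem_cons_of_mem _ hl))
    have hts := len_le_sum t (fun l hl => h1 l (List.mem_cons_of_mem _ hl))
    cases t with
    | nil => simp
    | cons b t2 =>
      simp only [List.map_cons, List.sum_cons, List.length_cons] at *
      set m := t2.length + 1 with hm
      set sm := b + t2.sum with hsm
      have h3 : (1:Nat) ≤ 3 := by norm_num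
      calc 3 ^ a + ((3:Nat) ^ b + (List.map (fun l => 3 ^ l) t2).sum)
          ≤ 3 ^ a + m * 3 ^ (sm - (m - 1)) := by omega
        _ ≤ 3 ^ (a + sm - m) + m * 3 ^ (a + sm - m) := by
            have e1 : a ≤ a + sm - m := by omega
            have e2 : sm - (m - 1) ≤ a + sm - m := by omega
            exact Nat.add_le_add (Nat.pow_le_pow_right h3 e1)
              (Nat.mul_le_mul_left m (Nat.pow_le_pow_right h3 e2))
        _ = (m + 1) * 3 ^ (a + sm - m) := by ring
        _ = (m + 1) * 3 ^ (a + sm - (m + 1 - 1)) := by simp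
  
theorem m_lt_pow (m : Nat) (h : 2 ≤ m) : m < 3 ^ (m - 1) := by
  induction m with
  | zero => omega
  | succ k ih =>
    rcases Nat.lt_or_ge k 2 with hk | hk
    · interval_cases k <;> simp_all
    · have := ih hk
      have hke : k + 1 - 1 = (k - 1) + 1 := by omega
      rw [hke, pow_succ]
      omega

theorem bSplitOnce_meas (part : List Char) (ps : List (List Char))
    (h : bSplitOnce part = some ps) : W ps < 3 ^ part.length := by
  obtain ⟨hf, hne, hcnt⟩ := bSplitOnce_pieces part ps h
  have hsum : (ps.map List.length).sum = part.length := by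
    rw [← List.length_flatten, hf]
  have h1 : ∀ l ∈ ps.map List.length, 1 ≤ l := by
    intro l hl
    obtain ⟨s, hs, rfl⟩ := List.mem_map.1 hl
    have := hne s hs
    cases s with
    | nil => simp_all
    | cons c t => simp
  have hWm : W ps = ((ps.map List.length).map (fun l => 3 ^ l)).sum := by
    rw [W, List.map_map]
    rfl
  have hmle := len_le_sum _ h1
  have := exp_sum_le (ps.map List.length) h1
  rw [hsum] at this hmle
  set m := (ps.map List.length).length with hmm
  have hm2 : 2 ≤ m := by rw [hmm, List.length_map]; exact hcnt
  have hlt := m_lt_pow m hm2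
  have hfin : m * 3 ^ (part.length - (m - 1)) < 3 ^ part.length := by
    calc m * 3 ^ (part.length - (m - 1)) < 3 ^ (m - 1) * 3 ^ (part.length - (m - 1)) := by
          have hX : 0 < 3 ^ (part.length - (m - 1)) := by positivity
          exact Nat.mul_lt_mul_of_lt_of_le hlt (le_refl _) hX
      _ = 3 ^ ((m - 1) + (part.length - (m - 1))) := by rw [pow_add]
      _ = 3 ^ part.length := by congr 1; omega
  omega

-- ---------- Group 6: the per-part bridge and the pass ----------
theorem bridge (st : Bool × List (List Char)) (part : List Char) (hqf : '\'' ∉ part) :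
    aProcess st part = (st.1 || (bSplitOnce part).isSome, st.2 ++ step1 part) := by
  simp only [aProcess]
  by_cases h1 : (!(part.any PySem.Chars.isdigit) && decide (2 < part.length)) = true
  · rw [if_pos h1]
    simp only [Bool.and_eq_true, Bool.not_eq_true', decide_eq_true_eq] at h1
    have hguard : bDigs part = [] ∧ 2 < part.length :=
      ⟨(bDigs_eq_nil_iff part).2 h1.1, h1.2⟩
    have hsplit : bSplitOnce part = some (bChunks part) := by
      unfold bSplitOnce
      rw [if_pos hguard]
    have hjoin : PySem.Chars.splitOn (PySem.Chars.join ['\''] (bChunks part)) ['\'']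
        = bChunks part := by
      rw [chars_splitOn_eq, join_eq_intercalate]
      apply List.splitOn_intercalate
      · intro l hl hql
        exact hqf (bChunks_subset part l hl '\'' hql)
      · obtain ⟨-, hcnt⟩ := bChunks_props part h1.2
        intro hnil
        rw [hnil] at hcnt
        simp at hcnt
    rw [show (PySem.List.pyRange 0 part.length 2).map
          (fun i => PySem.List.slice part (some i) (some (i + 2))) = bChunks part from rfl]
    rw [hjoin, hsplit]
    simp [step1, hsplit]
  · rw [if_neg h1]
    simp only [Bool.and_eq_true, Bool.not_eq_true', decide_eq_true_eq, not_and_or] at h1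
    have hguard : ¬ (bDigs part = [] ∧ 2 < part.length) := by
      rw [bDigs_eq_nil_iff part]
      tauto
    by_cases hw : bCuts part (bDigs part) = []
    · have hsplit : bSplitOnce part = none := by
        unfold bSplitOnce
        rw [if_neg hguard, if_pos hw]
      rw [aScan_eq]
      simp [wCuts, hw, hsplit, step1]
    · have hsplit : bSplitOnce part = some (segsOf part (wCuts part)) := by
        unfold bSplitOnce
        rw [if_neg hguard, if_neg hw]
        rw [segsOf_shape]
      have hLb := wCuts_bounds part
      have hpw := wCuts_pairwise part
      rw [aScan_eq]
      have hwne : ((wCuts part).map (fun i => i + 2)).isEmpty = false := by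
        simp [wCuts, hw]
      rw [hwne]
      simp only [Bool.not_false, if_pos]
      have hsorted : PySem.List.sorted ((wCuts part).map (fun i => i + 2)) (fun x => x) true
          = ((wCuts part).map (fun i => i + 2)).reverse := by
        apply PySem.List.sorted_rev_eq_of_perm_of_pairwise_gt
        · exact List.reverse_perm _
        · rw [List.pairwise_reverse]
          exact List.Pairwise.map (fun i => i + 2) (fun a b hab => by dsimp only; omega) hpw
      have hfold : ((wCuts part).map (fun i => i + 2)).reverse.foldl
          (fun t pos => PySem.List.slice t none (some (pos - 2)) ++
                        '\'' :: PySem.List.slice t (some (pos - 2)) none) part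
          = List.foldl insQ part (wCuts part).reverse := by
        rw [← List.map_reverse, List.foldl_map]
        congr 1
        funext acc e
        show PySem.List.slice acc none (some (e + 2 - 2)) ++
             '\'' :: PySem.List.slice acc (some (e + 2 - 2)) none = insQ acc e
        rw [show (e + 2 - 2 : Int) = e by ring]
        rfl
      rw [hsorted, hfold, insQ_fold _ _ hpw hLb]
      have hsegsplit : PySem.Chars.splitOn (['\''].intercalate (segsOf part (wCuts part))) ['\'']
          = segsOf part (wCuts part) := by
        rw [chars_splitOn_eq]
        apply List.splitOn_intercalate
        · intro l hl hql
          exact hqf (segsOf_subset part _ l hl '\'' hql)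
        · have := segsOf_length part (wCuts part)
          intro hnil
          rw [hnil] at this
          simp at this
      rw [hsegsplit, hsplit]
      simp [step1, hsplit]

theorem pass_eq (parts : List (List Char)) (b0 : Bool) (acc : List (List Char))
    (hqf : ∀ p ∈ parts, '\'' ∉ p) :
    parts.foldl aProcess (b0, acc) =
      (b0 || parts.any (fun p => (bSplitOnce p).isSome), acc ++ parts.flatMap step1) := by
  induction parts generalizing b0 acc with
  | nil => simp
  | cons p t ih =>
    rw [List.foldl_cons, bridge (b0, acc) p (hqf p (List.mem_cons_self ..)),
        ih _ _ (fun p' hp' => hqf p' (List.mem_cons_of_mem _ hp'))]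
    simp [Bool.or_assoc]

-- ---------- Group 7: the loop ----------
theorem redNF_fuel_aux : ∀ (n : Nat) (p : List Char) (fuel fuel' : Nat), p.length = n →
    p.length < fuel → p.length < fuel' → redNF fuel p = redNF fuel' p := by
  intro n
  induction n using Nat.strong_induction_on with
  | _ n ih =>
    intro p fuel fuel' hn h h'
    obtain ⟨f, rfl⟩ := Nat.exists_eq_succ_of_ne_zero (by omega : fuel ≠ 0)
    obtain ⟨f', rfl⟩ := Nat.exists_eq_succ_of_ne_zero (by omega : fuel' ≠ 0)
    simp only [redNF]
    cases hsp : bSplitOnce p with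
    | none => rfl
    | some ps =>
      apply List.flatMap_congr
      intro s hs
      have hlt := bSplitOnce_shorter p ps hsp s hs
      exact ih s.length (by omega) s _ _ rfl (by omega) (by omega)

theorem redNF_fuel (p : List Char) (fuel fuel' : Nat)
    (h : p.length < fuel) (h' : p.length < fuel') : redNF fuel p = redNF fuel' p :=
  redNF_fuel_aux p.length p fuel fuel' rfl h h' 

theorem redF_none (p : List Char) (h : bSplitOnce p = none) : redF p = [p] := by
  simp [redF, redNF, h]

theorem redF_some (p : List Char) (ps : List (List Char)) (h : bSplitOnce p = some ps) :
    redF p = ps.flatMap redF := by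
  simp only [redF, redNF, h]
  apply List.flatMap_congr
  intro s hs
  have hlt := bSplitOnce_shorter p ps h s hs
  exact redNF_fuel s _ _ (by omega) (by omega)

theorem bReduce_fuel_aux : ∀ (n : Nat) (p : List Char) (fuel fuel' : Nat), p.length = n →
    p.length < fuel → p.length < fuel' → bReduce fuel p = bReduce fuel' p := by
  intro n
  induction n using Nat.strong_induction_on with
  | _ n ih =>
    intro p fuel fuel' hn h h'
    obtain ⟨f, rfl⟩ := Nat.exists_eq_succ_of_ne_zero (by omega : fuel ≠ 0)
    obtain ⟨f', rfl⟩ := Nat.exists_eq_succ_of_ne_zero (by omega : fuel' ≠ 0)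
    simp only [bReduce]
    cases hsp : bSplitOnce p with
    | none => rfl
    | some ps =>
      apply List.flatMap_congr
      intro s hs
      have hlt := bSplitOnce_shorter p ps hsp s hs
      exact ih s.length (by omega) s _ _ rfl (by omega) (by omega)

theorem bReduce_fuel (p : List Char) (fuel fuel' : Nat)
    (h : p.length < fuel) (h' : p.length < fuel') : bReduce fuel p = bReduce fuel' p :=
  bReduce_fuel_aux p.length p fuel fuel' rfl h h' 

theorem bReduce_eq_filter (p : List Char) :
    bReduce (p.length + 1) p = (redF p).filter (fun s => s ≠ []) := by
  induction hn : p.length using Nat.strong_induction_on generalizing p with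
  | _ n ih =>
    subst hn
    cases h : bSplitOnce p with
    | none =>
      rw [redF_none p h]
      simp only [bReduce, h]
      by_cases hp : p = [] <;> simp [hp]
    | some ps =>
      rw [redF_some p ps h, List.filter_flatMap]
      simp only [bReduce, h]
      apply List.flatMap_congr
      intro s hs
      have hlt := bSplitOnce_shorter p ps h s hs
      rw [bReduce_fuel s _ (s.length + 1) (by omega) (by omega)]
      exact ih s.length hlt s rfl

theorem W_flatMap (l : List (List Char)) :
    W (l.flatMap step1) = (l.map (fun p => W (step1 p))).sum := by
  induction l with
  | nil => simp [W]
  | cons q t ih =>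
    simp only [List.flatMap_cons, List.map_cons, List.sum_cons, W, List.map_append,
      List.sum_append] at *
    omega

theorem aLoop_eq (fuel : Nat) (parts : List (List Char))
    (hqf : ∀ p ∈ parts, '\'' ∉ p) (hfuel : W parts < fuel) :
    aLoop fuel parts = parts.flatMap redF := by
  induction fuel generalizing parts with
  | zero => omega
  | succ fuel ih =>
    simp only [aLoop, aPass]
    rw [pass_eq parts false [] hqf]
    simp only [Bool.false_or, List.nil_append]
    have hstepred : parts.flatMap redF = (parts.flatMap step1).flatMap redF := by
      rw [List.flatMap_assoc]
      apply List.flatMap_congr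
      intro p hp
      cases h : bSplitOnce p with
      | none => simp [step1, h, redF_none p h]
      | some ps => rw [redF_some p ps h]; simp [step1, h]
    by_cases hany : parts.any (fun p => (bSplitOnce p).isSome) = true
    · rw [hany, if_pos rfl]
      have hqf' : ∀ p' ∈ parts.flatMap step1, '\'' ∉ p' := by
        intro p' hp'
        obtain ⟨p, hp, hp'mem⟩ := List.mem_flatMap.1 hp'
        cases h : bSplitOnce p with
        | none =>
          simp only [step1, h, Option.getD_none, List.mem_singleton] at hp'mem
          rw [hp'mem]
          exact hqf p hp
        | some ps =>
          simp only [step1, h, Option.getD_some] at hp'mem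
          intro hq
          exact hqf p hp (bSplitOnce_subset p ps h p' hp'mem '\'' hq)
      have hWlt : W (parts.flatMap step1) < W parts := by
        obtain ⟨p0, hp0, hp0some⟩ := List.any_eq_true.1 hany
        rw [W_flatMap, W]
        apply List.sum_lt_sum
        · intro p hp
          cases h : bSplitOnce p with
          | none => simp [step1, h, W]
          | some ps =>
            have := bSplitOnce_meas p ps h
            simp only [step1, h, Option.getD_some]
            omega
        · refine ⟨p0, hp0, ?_⟩
          cases h : bSplitOnce p0 with
          | none => rw [h] at hp0some; simp at hp0some
          | some ps =>
            have := bSplitOnce_meas p0 ps h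
            simp only [step1, h, Option.getD_some]
            omega
      rw [ih (parts.flatMap step1) hqf' (by omega), hstepred]
    · simp only [Bool.not_eq_true] at hany
      rw [hany, if_neg (by simp)]
      have hall : ∀ p ∈ parts, bSplitOnce p = none := by
        intro p hp
        have := List.any_eq_false.1 hany p hp
        simpa [Option.isSome_eq_false_iff, Option.isNone_iff_eq_none] using this
      have h1 : parts.flatMap step1 = parts := by
        calc parts.flatMap step1 = parts.flatMap (fun p => [p]) :=
              List.flatMap_congr (fun p hp => by simp [step1, hall p hp])
          _ = parts := List.flatMap_singleton' parts
      have h2 : parts.flatMap redF = parts := by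
        calc parts.flatMap redF = parts.flatMap (fun p => [p]) :=
              List.flatMap_congr (fun p hp => redF_none p (hall p hp))
          _ = parts := List.flatMap_singleton' parts
      rw [h1, h2]

-- ===== VERDICT (by name: the statement is the Claim_ definition above) =====
theorem ffkl_spec : Claim_equal_ffkl := by
  intro yr2 _
  show ffkl yr2 = ffkl_alt yr2
  have hqf : ∀ p ∈ PySem.Chars.splitOn yr2.toList ['\''], '\'' ∉ p := by
    rw [chars_splitOn_eq]; exact splitOn_sep_free _ _
  simp only [ffkl, ffkl_alt]
  rw [aLoop_eq _ _ hqf (by unfold W; exact Nat.lt_succ_self _), List.filter_flatMap]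
  simp only [← bReduce_eq_filter]
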